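-- pv_equiv track=rewrite | github.com/IanPTan/AOT2025 | day3/part1.py | first_max
-- ===== SOURCE A (Python) =====
-- def first_max(nums):
--     max_num = nums[0]
--     max_ind = 0
--
--     for i in range(1, len(nums)):
--         if nums[i] > max_num:
--             max_num = nums[i]
--             max_ind = i
--
--     return max_num, max_ind
-- ===== SOURCE B (Python) =====
-- def first_max(nums):
--     max_num = max(nums)
--     return max_num, nums.index(max_num)
-- ===== Notes on version B (the rewrite author's own statement) =====
-- stated objective: idiomatic
-- what changed: Replaces the fused index-loop that tracks a running maximum and its index with two standard-library passes: max(nums) to get the value, then nums.index(...) for its first position.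
-- outside the precondition, e.g. on first_max([]): A raises IndexError, B raises ValueError
import Mathlib
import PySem

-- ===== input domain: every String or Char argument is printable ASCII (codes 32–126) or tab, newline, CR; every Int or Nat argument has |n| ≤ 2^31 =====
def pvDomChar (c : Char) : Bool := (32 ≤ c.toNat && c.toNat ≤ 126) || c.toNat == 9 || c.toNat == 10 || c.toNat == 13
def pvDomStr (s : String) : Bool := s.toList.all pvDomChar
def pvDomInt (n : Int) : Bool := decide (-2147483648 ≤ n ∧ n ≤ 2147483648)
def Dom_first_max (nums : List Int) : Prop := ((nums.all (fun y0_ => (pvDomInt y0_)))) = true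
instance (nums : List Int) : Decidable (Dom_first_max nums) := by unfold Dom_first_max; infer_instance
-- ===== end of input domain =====

-- B replaces A's fused running-max/index loop with two library passes (max, then first index); same O(n) cost.

-- ===== PORT A =====
def first_max (nums : List Int) : Int × Int :=
  let max_num := PySem.List.pyGetD nums 0 0
  (PySem.List.pyRange 1 (nums.length : Int) 1).foldl
    (fun st i =>
      if PySem.List.pyGetD nums i 0 > st.1 then (PySem.List.pyGetD nums i 0, i) else st)
    (max_num, 0)

-- ===== PORT B =====
def first_max_alt (nums : List Int) : Int × Int :=
  let max_num := (PySem.List.max? nums (fun y => y)).getD 0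
  (max_num, (((PySem.List.index? nums max_num).getD 0 : Nat) : Int))

-- ===== PRECONDITION & SPEC =====
-- A raises IndexError on [] (nums[0]); B raises ValueError there (max of empty). Pre_ excludes only the empty list.
def Pre_first_max (nums : List Int) : Prop := nums ≠ []
instance (nums : List Int) : Decidable (Pre_first_max nums) := by unfold Pre_first_max; infer_instance
def pvWitness_first_max : List Int := [3, 7, 7, 1]

def Spec_first_max (nums : List Int) (out : Int × Int) : Prop := out = first_max_alt nums
instance (nums : List Int) (out : Int × Int) : Decidable (Spec_first_max nums out) := by unfold Spec_first_max; infer_instance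

-- ===== CLAIM =====
def Claim_equal_first_max : Prop := ∀ (nums : List Int), Dom_first_max nums → Pre_first_max nums → Spec_first_max nums (first_max nums)

-- ===== LEMMAS AND PROOFS =====

lemma firstMax_singleton (x : Int) : first_max [x] = (x, 0) := by
  simp [first_max, PySem.List.pyRange_one_eq_nil]

lemma firstMaxAlt_singleton (x : Int) : first_max_alt [x] = (x, 0) := by
  simp [first_max_alt, PySem.List.max?, PySem.List.index?]

lemma firstMax_append (xs : List Int) (y : Int) (hxs : xs ≠ []) :
    first_max (xs ++ [y]) =
      if y > (first_max xs).1 then (y, (xs.length : Int)) else first_max xs := by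
  have hlen : 1 ≤ (xs.length : Int) := by
    have := List.length_pos_iff.mpr hxs; omega
  have hsplit : PySem.List.pyRange 1 ((xs ++ [y]).length : Int) 1 =
      PySem.List.pyRange 1 (xs.length : Int) 1 ++ [(xs.length : Int)] := by
    have : ((xs ++ [y]).length : Int) = (xs.length : Int) + 1 := by
      simp
    rw [this, PySem.List.pyRange_one_succ_right hlen]
  simp only [first_max, hsplit, List.foldl_append, List.foldl_cons, List.foldl_nil]
  have hhead : PySem.List.pyGetD (xs ++ [y]) 0 0 = PySem.List.pyGetD xs 0 0 := by
    cases xs with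
    | nil => exact absurd rfl hxs
    | cons a t => simp [PySem.List.pyGetD_zero]
  have hget : ∀ i ∈ PySem.List.pyRange 1 (xs.length : Int) 1,
      PySem.List.pyGetD (xs ++ [y]) i 0 = PySem.List.pyGetD xs i 0 := by
    intro i hi
    have hi' := (PySem.List.mem_pyRange_one).1 hi
    rw [PySem.List.pyGetD_eq_getElem (xs ++ [y]) 0 (by omega) (by simp; omega),
        PySem.List.pyGetD_eq_getElem xs 0 (by omega) (by omega)]
    exact List.getElem_append_left _
  have hfold : (PySem.List.pyRange 1 (xs.length : Int) 1).foldl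
      (fun st i => if PySem.List.pyGetD (xs ++ [y]) i 0 > st.1
        then (PySem.List.pyGetD (xs ++ [y]) i 0, i) else st)
      (PySem.List.pyGetD (xs ++ [y]) 0 0, 0)
      = (PySem.List.pyRange 1 (xs.length : Int) 1).foldl
      (fun st i => if PySem.List.pyGetD xs i 0 > st.1
        then (PySem.List.pyGetD xs i 0, i) else st)
      (PySem.List.pyGetD xs 0 0, 0) := by
    rw [hhead]
    apply List.foldl_ext
    intro st i hi
    rw [hget i hi]
  rw [hfold]
  have hlast : PySem.List.pyGetD (xs ++ [y]) (xs.length : Int) 0 = y := by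
    rw [PySem.List.pyGetD_eq_getElem (xs ++ [y]) 0 (by omega) (by simp)]
    simp
  rw [hlast]

lemma max_mem_le (xs : List Int) (m : Int) (h : PySem.List.max? xs (fun y => y) = some m) :
    m ∈ xs ∧ ∀ z ∈ xs, z ≤ m :=
  ⟨PySem.List.max?_mem h, fun z hz => PySem.List.max?_isMax h z hz⟩

lemma firstMaxAlt_append (xs : List Int) (y : Int) (hxs : xs ≠ []) :
    first_max_alt (xs ++ [y]) =
      if y > (first_max_alt xs).1 then (y, (xs.length : Int)) else first_max_alt xs := by
  obtain ⟨x, t, rfl⟩ := List.exists_cons_of_ne_nil hxs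
  have hmax : PySem.List.max? (x :: t) (fun y => y) = some (t.foldl max x) :=
    PySem.List.max?_id_cons x t
  have hmax2 : PySem.List.max? (x :: t ++ [y]) (fun y => y) =
      some (max (t.foldl max x) y) := by
    have : (x :: t ++ [y]) = x :: (t ++ [y]) := by simp
    rw [this, PySem.List.max?_id_cons x (t ++ [y]), List.foldl_append]
    simp
  set m := t.foldl max x with hm
  obtain ⟨hmem, hle⟩ := max_mem_le (x :: t) m hmax
  by_cases hy : y > m
  · have hmaxval : max m y = y := by omega
    have hnot : y ∉ x :: t := fun hc => by have := hle y hc; omega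
    simp only [first_max_alt, hmax, hmax2, hmaxval, Option.getD_some]
    rw [show x :: t ++ [y] = (x :: t) ++ [y] from rfl,
        PySem.List.index?_append_singleton_self (x :: t) y hnot]
    simp only [Option.getD_some]
    have : (first_max_alt (x :: t)).1 = m := by
      simp [first_max_alt, hmax]
    rw [this] at *
    simp [hy]
  · have hmaxval : max m y = m := by omega
    simp only [first_max_alt, hmax, hmax2, hmaxval, Option.getD_some]
    rw [show x :: t ++ [y] = (x :: t) ++ [y] from rfl,
        PySem.List.index?_append_of_mem _ hmem]
    simp [hy]

-- ===== VERDICT =====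
theorem first_max_spec : Claim_equal_first_max := by
  intro nums hdom hpre
  clear hdom
  unfold Spec_first_max
  induction nums using List.reverseRecOn with
  | nil => exact absurd rfl hpre
  | append_singleton xs y ih =>
    by_cases hxs : xs = []
    · subst hxs
      simp [firstMax_singleton, firstMaxAlt_singleton]
    · rw [firstMax_append xs y hxs, firstMaxAlt_append xs y hxs, ih hxs]
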